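-- pv_equiv track=rewrite | github.com/fenixguard/yandex_algorithms | sprint_8/G.search_with_offset.py | find
-- ===== SOURCE A (Python) =====
-- from typing import List
--
-- def find(search: List[int], pattern: List[int], start: int) -> int:
--     result = -1
--
--     if start >= len(search):
--         return result
--
--     if len(search) - start < len(pattern):
--         return result
--
--     for pos in range(start, len(search) - len(pattern) + 1):
--         shift = None
--         match = True
--
--         for offset in range(len(pattern)):
--             if shift is None:
--                 shift = pattern[offset] - search[pos]
--
--             if search[pos + offset] + shift != pattern[offset]:
--                 match = False
--                 break
--
--         if match:
--             result = pos + 1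
--             break
--
--     return result
-- ===== SOURCE B (Python) =====
-- from typing import List
--
-- def find(search: List[int], pattern: List[int], start: int) -> int:
--     n, m = len(search), len(pattern)
--     if start >= n or n - start < m:
--         return -1
--     if m <= 1:
--         return start + 1
--     # a window matches up to a constant shift iff its difference sequence equals the pattern's
--     dp = [pattern[i + 1] - pattern[i] for i in range(m - 1)]
--     ds = [search[i + 1] - search[i] for i in range(n - 1)]
--     for pos in range(start, n - m + 1):
--         if ds[pos:pos + m - 1] == dp:
--             return pos + 1
--     return -1
-- ===== Notes on version B (the rewrite author's own statement) =====
-- stated objective: alternative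
-- what changed: B reduces shift-invariant window matching to exact matching of precomputed difference sequences (one diff array per list, slice equality per window) instead of recomputing a per-window shift and comparing element-by-element with it.
-- outside the precondition, e.g. on find([1, 2, 1, 2], [8, 9], -2): A returns -1, B returns 1
import Mathlib
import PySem

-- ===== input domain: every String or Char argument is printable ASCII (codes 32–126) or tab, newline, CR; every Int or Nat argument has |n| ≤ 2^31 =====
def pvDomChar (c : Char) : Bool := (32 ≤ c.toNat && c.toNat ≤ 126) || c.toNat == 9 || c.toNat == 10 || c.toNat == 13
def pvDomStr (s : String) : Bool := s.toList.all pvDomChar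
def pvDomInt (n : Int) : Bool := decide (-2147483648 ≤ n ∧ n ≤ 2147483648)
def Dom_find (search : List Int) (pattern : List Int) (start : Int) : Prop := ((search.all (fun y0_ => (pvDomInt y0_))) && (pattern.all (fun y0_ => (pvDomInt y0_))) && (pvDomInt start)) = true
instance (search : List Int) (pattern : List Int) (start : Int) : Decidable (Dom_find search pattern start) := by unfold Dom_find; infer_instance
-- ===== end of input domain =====

-- B replaces A's per-window shift computation by exact matching of precomputed
-- difference sequences (same asymptotic cost; alternative algorithm).

-- ===== PORT A =====
-- inner 'for offset in range(len(pattern))' loop: state = (shift, running offsets); break ⇒ false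
def findInner (search pattern : List Int) (pos : Int) : List Int → Option Int → Bool
  | [], _ => true
  | off :: rest, shift =>
    let shift' : Int := match shift with
      | none => PySem.List.pyGetD pattern off 0 - PySem.List.pyGetD search pos 0
      | some s => s
    if PySem.List.pyGetD search (pos + off) 0 + shift' ≠ PySem.List.pyGetD pattern off 0 then false
    else findInner search pattern pos rest (some shift')

-- outer 'for pos in range(start, …)' loop with break-on-match
def findOuter (search pattern : List Int) : List Int → Int
  | [] => -1
  | pos :: rest =>
    if findInner search pattern pos (PySem.List.pyRange 0 (pattern.length : Int) 1) none
    then pos + 1 else findOuter search pattern rest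

def find (search : List Int) (pattern : List Int) (start : Int) : Int :=
  if start ≥ (search.length : Int) then -1
  else if (search.length : Int) - start < (pattern.length : Int) then -1
  else findOuter search pattern
    (PySem.List.pyRange start ((search.length : Int) - (pattern.length : Int) + 1) 1)

-- ===== PORT B =====
def findAltLoop (ds dp : List Int) (m : Int) : List Int → Int
  | [] => -1
  | pos :: rest =>
    if PySem.List.slice ds (some pos) (some (pos + m - 1)) = dp then pos + 1
    else findAltLoop ds dp m rest

def find_alt (search : List Int) (pattern : List Int) (start : Int) : Int :=
  let n : Int := search.length
  let m : Int := pattern.length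
  if start ≥ n || n - start < m then -1
  else if m ≤ 1 then start + 1
  else
    let dp := (PySem.List.pyRange 0 (m - 1) 1).map
      (fun i => PySem.List.pyGetD pattern (i + 1) 0 - PySem.List.pyGetD pattern i 0)
    let ds := (PySem.List.pyRange 0 (n - 1) 1).map
      (fun i => PySem.List.pyGetD search (i + 1) 0 - PySem.List.pyGetD search i 0)
    findAltLoop ds dp m (PySem.List.pyRange start (n - m + 1) 1)

-- ===== PRECONDITION & SPEC =====
-- Pre_ excludes negative start, outside the function's natural domain: there A either raises
-- IndexError (start < -len(search), nonempty pattern) or returns an accidental value via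
-- Python's negative-index wraparound (e.g. A returns -1 on ([1,2,1,2],[8,9],-2) although a
-- shifted match exists at position 0, which B reports as 1).
def Pre_find (search : List Int) (pattern : List Int) (start : Int) : Prop := 0 ≤ start
instance (search : List Int) (pattern : List Int) (start : Int) : Decidable (Pre_find search pattern start) := by unfold Pre_find; infer_instance
def pvWitness_find : List Int × List Int × Int := ([3, 1, 4, 1, 5], [10, 7], 0)
def Spec_find (search : List Int) (pattern : List Int) (start : Int) (out : Int) : Prop := out = find_alt search pattern start
instance (search : List Int) (pattern : List Int) (start : Int) (out : Int) : Decidable (Spec_find search pattern start out) := by unfold Spec_find; infer_instance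

-- ===== CLAIM (what is proved, stated in full; the proofs are below) =====
def Claim_equal_find : Prop := ∀ (search : List Int) (pattern : List Int) (start : Int), Dom_find search pattern start → Pre_find search pattern start → Spec_find search pattern start (find search pattern start)

-- ===== LEMMAS AND PROOFS =====

-- A's inner loop once the shift has been fixed: a Boolean 'all' over the remaining offsets
theorem findInner_some (s p : List Int) (pos c : Int) (offs : List Int) :
    findInner s p pos offs (some c)
      = offs.all (fun o => PySem.List.pyGetD s (pos + o) 0 + c == PySem.List.pyGetD p o 0) := by
  induction offs with
  | nil => simp [findInner]
  | cons o rest ih =>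
    simp only [findInner, List.all_cons, ih]
    by_cases h : PySem.List.pyGetD s (pos + o) 0 + c = PySem.List.pyGetD p o 0 <;> simp [h]

-- A's inner loop from scratch (m ≥ 1): the first offset fixes the shift and always matches
theorem findInner_none (s p : List Int) (pos : Int) (m : Nat) (hm : 1 ≤ m) :
    findInner s p pos (PySem.List.pyRange 0 (m : Int) 1) none
      = (PySem.List.pyRange 1 (m : Int) 1).all
          (fun o => PySem.List.pyGetD s (pos + o) 0
              + (PySem.List.pyGetD p 0 0 - PySem.List.pyGetD s pos 0)
              == PySem.List.pyGetD p o 0) := by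
  rw [PySem.List.pyRange_one_cons (by exact_mod_cast hm)]
  simp only [findInner]
  rw [if_neg (by simp)]
  exact findInner_some ..

-- telescoping: all values equal to G 0 ⟺ all consecutive values equal
theorem telescope (G : Nat → Int) (m : Nat) :
    (∀ j : Nat, 1 ≤ j → j < m → G j = G 0) ↔ (∀ k : Nat, k + 1 < m → G (k + 1) = G k) := by
  constructor
  · intro h k hk
    rcases Nat.eq_zero_or_pos k with rfl | hk0
    · exact h 1 le_rfl hk
    · rw [h (k+1) (by omega) hk, h k (by omega) (by omega)]
  · intro h j _ hj
    induction j with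
    | zero => rfl
    | succ j ih =>
      rcases Nat.eq_zero_or_pos j with rfl | hj0
      · exact h 0 hj
      · rw [h j hj, ih hj0 (by omega)]

-- the two scans agree as soon as their per-position match tests agree
theorem scan_congr (s p ds dp : List Int) (m : Int) (l : List Int)
    (h : ∀ pos ∈ l,
      (findInner s p pos (PySem.List.pyRange 0 (p.length : Int) 1) none = true)
        ↔ (PySem.List.slice ds (some pos) (some (pos + m - 1)) = dp)) :
    findOuter s p l = findAltLoop ds dp m l := by
  induction l with
  | nil => rfl
  | cons pos rest ih =>
    simp only [findOuter, findAltLoop]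
    by_cases hc : findInner s p pos (PySem.List.pyRange 0 (p.length : Int) 1) none = true
    · rw [if_pos hc, if_pos ((h pos (by simp)).mp hc)]
    · rw [if_neg hc, if_neg (fun hs => hc ((h pos (by simp)).mpr hs)),
        ih (fun q hq => h q (by simp [hq]))]

-- a Nat-range view of drop on List.range
theorem drop_range_eq (n q : ℕ) : (List.range n).drop q = (List.range (n - q)).map (q + ·) := by
  rw [List.range_eq_range', List.drop_range', List.range'_eq_map_range]
  simp

-- the per-position match tests of A and B agree (m ≥ 2, window in range)
theorem match_iff (s p : List Int) (pos : Int) (hm : 2 ≤ p.length)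
    (h0 : 0 ≤ pos) (h1 : pos + p.length ≤ s.length) :
    (findInner s p pos (PySem.List.pyRange 0 (p.length : Int) 1) none = true)
      ↔ (PySem.List.slice
            ((PySem.List.pyRange 0 ((s.length : Int) - 1) 1).map
              (fun i => PySem.List.pyGetD s (i + 1) 0 - PySem.List.pyGetD s i 0))
            (some pos) (some (pos + (p.length : Int) - 1))
          = (PySem.List.pyRange 0 ((p.length : Int) - 1) 1).map
              (fun i => PySem.List.pyGetD p (i + 1) 0 - PySem.List.pyGetD p i 0)) := by
  obtain ⟨q, rfl⟩ : ∃ q : ℕ, (q : Int) = pos := ⟨pos.toNat, Int.toNat_of_nonneg h0⟩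
  set n := s.length with hn
  set m := p.length with hmdef
  have hqn : q + m ≤ n := by exact_mod_cast h1
  set G : ℕ → ℤ := fun j =>
    PySem.List.pyGetD s ((q + j : ℕ) : Int) 0 - PySem.List.pyGetD p (j : Int) 0 with hG
  -- A's side: all offsets 1 ≤ o < m satisfy the fixed-shift equation
  have hA : (findInner s p (q : Int) (PySem.List.pyRange 0 (m : Int) 1) none = true)
      ↔ (∀ j : ℕ, 1 ≤ j → j < m → G j = G 0) := by
    rw [findInner_none s p _ m (by omega), List.all_eq_true]
    constructor
    · intro h j h1j hjm
      have := h (j : Int) (PySem.List.mem_pyRange_one.mpr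
        ⟨by exact_mod_cast h1j, by exact_mod_cast hjm⟩)
      rw [beq_iff_eq] at this
      simp only [hG]
      push_cast at this ⊢
      simp only [add_zero] at this ⊢
      omega
    · intro h o ho
      obtain ⟨h1o, hom⟩ := PySem.List.mem_pyRange_one.mp ho
      obtain ⟨j, rfl⟩ : ∃ j : ℕ, (j : Int) = o := ⟨o.toNat, Int.toNat_of_nonneg (by omega)⟩
      have := h j (by exact_mod_cast h1o) (by exact_mod_cast hom)
      simp only [hG] at this
      rw [beq_iff_eq]
      push_cast at this ⊢
      simp only [add_zero] at this ⊢
      omega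
  -- B's side: the two difference lists agree elementwise
  have hB : (PySem.List.slice
        ((PySem.List.pyRange 0 ((n : Int) - 1) 1).map
          (fun i => PySem.List.pyGetD s (i + 1) 0 - PySem.List.pyGetD s i 0))
        (some (q : Int)) (some ((q : Int) + (m : Int) - 1))
      = (PySem.List.pyRange 0 ((m : Int) - 1) 1).map
          (fun i => PySem.List.pyGetD p (i + 1) 0 - PySem.List.pyGetD p i 0))
      ↔ (∀ k : ℕ, k + 1 < m → G (k + 1) = G k) := by
    have hn1 : ((n : Int) - 1) = ((n - 1 : ℕ) : Int) := by omega
    have hm1 : ((m : Int) - 1) = ((m - 1 : ℕ) : Int) := by omega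
    rw [hn1, hm1, PySem.List.pyRange_zero_natCast, PySem.List.pyRange_zero_natCast,
      List.map_map, List.map_map,
      PySem.List.slice_toNat _ (by positivity) (by omega)]
    have htoNat : ((q : Int) + (m : Int) - 1).toNat - ((q : Int)).toNat = m - 1 := by omega
    rw [htoNat, Int.toNat_natCast, ← List.map_drop, drop_range_eq, List.map_map,
      ← List.map_take, List.take_range]
    have hmin : min (m - 1) (n - 1 - q) = m - 1 := by omega
    rw [hmin, List.map_eq_map_iff]
    constructor
    · intro h k hk
      have := h k (List.mem_range.mpr (by omega))
      simp only [Function.comp_apply] at this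
      simp only [hG]
      push_cast at this ⊢
      simp only [← add_assoc] at this ⊢
      omega
    · intro h k hk
      have hk' := List.mem_range.mp hk
      have := h k (by omega)
      simp only [hG] at this
      simp only [Function.comp_apply]
      push_cast at this ⊢
      simp only [← add_assoc] at this ⊢
      omega
  rw [hA, hB, telescope G m]

theorem find_spec : Claim_equal_find := by
  intro s p start _ hpre
  show find s p start = find_alt s p start
  by_cases hg1 : start ≥ (s.length : Int)
  · simp [find, find_alt, hg1]
  · by_cases hg2 : (s.length : Int) - start < (p.length : Int)
    · simp [find, find_alt, hg1, hg2]
    · have hpre' : (0 : Int) ≤ start := hpre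
      have hlt : start < (s.length : Int) - (p.length : Int) + 1 := by omega
      by_cases hm1 : p.length ≤ 1
      · have hm1' : ((p.length : Int)) ≤ 1 := by exact_mod_cast hm1
        simp only [find, find_alt, hg1, hg2, hm1', decide_false, Bool.or_false, if_false, if_true] at *
        rw [PySem.List.pyRange_one_cons hlt]
        obtain h0 | h1 : p.length = 0 ∨ p.length = 1 := by omega
        · simp [findOuter, h0, PySem.List.pyRange_one_eq_nil, findInner]
        · simp only [findOuter, h1, Nat.cast_one]
          have hr : PySem.List.pyRange (0 : Int) 1 1 = [0] := by decide
          rw [hr]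
          simp [findInner]
      · have hm2 : 2 ≤ p.length := by omega
        have hm2' : ¬ ((p.length : Int) ≤ 1) := by exact_mod_cast not_le.mpr (by omega : (1:Int) < p.length)
        simp only [find, find_alt, hg1, hg2, hm2', decide_false, Bool.or_false, if_false, not_le] at *
        apply scan_congr
        intro pos hmem
        obtain ⟨hp1, hp2⟩ := PySem.List.mem_pyRange_one.mp hmem
        exact match_iff s p pos hm2 (by omega) (by omega)
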